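-- pv_equiv track=rewrite | github.com/joeoakes/abcapsp26TuThT4 | test_runners/test_maze_agent.py | _open_maze
-- ===== SOURCE A (Python) =====
-- def _open_maze(w, h):
--     """Return a cell list with all internal walls removed."""
--     cells = [15] * (w * h)
--     for y in range(h):
--         for x in range(w):
--             if x < w - 1:
--                 cells[y*w+x]   &= ~2   # clear WALL_E
--                 cells[y*w+x+1] &= ~8   # clear WALL_W
--             if y < h - 1:
--                 cells[y*w+x]       &= ~4  # clear WALL_S
--                 cells[(y+1)*w+x]   &= ~1  # clear WALL_N
--     return cells
-- ===== SOURCE B (Python) =====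
-- def _open_maze(w, h):
--     """Return a cell list with all internal walls removed.
--
--     Each cell is computed independently from its border position: a wall
--     bit survives only on the outer boundary of the grid (N=1, E=2, S=4,
--     W=8), so no cross-cell clearing is needed.
--     """
--     cells = []
--     for y in range(h):
--         for x in range(w):
--             v = 0
--             if y == 0:
--                 v |= 1        # WALL_N kept only on the top row
--             if x == w - 1:
--                 v |= 2        # WALL_E kept only on the rightmost column
--             if y == h - 1:
--                 v |= 4        # WALL_S kept only on the bottom row
--             if x == 0:
--                 v |= 8        # WALL_W kept only on the leftmost column
--             cells.append(v)
--     return cells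
-- ===== Notes on version B (the rewrite author's own statement) =====
-- stated objective: simpler
-- what changed: Instead of starting every cell at 15 and clearing walls from pairs of neighboring cells with &= ~bit, B computes each cell independently in closed form from its border position (set N/E/S/W bits only on the matching grid edge), with no cross-cell writes and no pre-built mutable list.
-- intended difference: When w < 0 and h < 0 the negative signs cancel in w*h, so A returns a list of w*h cells all equal to 15 with no walls removed; B returns the empty list, the intended result for a grid with non-positive dimensions. — e.g. on _open_maze(-1, -1): A returns [15], B returns []
import Mathlib
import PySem

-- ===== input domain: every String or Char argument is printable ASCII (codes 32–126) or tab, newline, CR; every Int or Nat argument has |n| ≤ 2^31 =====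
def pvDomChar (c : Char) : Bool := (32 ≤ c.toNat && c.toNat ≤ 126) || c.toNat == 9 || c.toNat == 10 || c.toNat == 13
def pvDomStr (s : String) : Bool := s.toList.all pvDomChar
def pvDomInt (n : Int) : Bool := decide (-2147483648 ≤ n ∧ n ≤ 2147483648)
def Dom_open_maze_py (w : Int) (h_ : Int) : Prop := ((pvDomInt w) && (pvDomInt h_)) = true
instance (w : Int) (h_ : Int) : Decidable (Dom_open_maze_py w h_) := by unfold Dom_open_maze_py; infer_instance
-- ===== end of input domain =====

-- B computes each cell independently in closed form from its border position instead of
-- clearing walls from pairs of neighboring cells; same return values except when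
-- w < 0 ∧ h_ < 0 (see D_open_maze_py below).

-- ===== PORT A =====

-- cells[i] &= m, ported as read-modify-write at index i.toNat: exact for the
-- nonnegative in-range indices this loop uses (Python would raise IndexError otherwise,
-- but every index A writes is in range).
def updA (cells : List Int) (i : Int) (m : Int) : List Int :=
  cells.set i.toNat ((cells.getD i.toNat 0).land m)

-- the body of A's inner loop (the two conditional pairs of &=-updates, in order)
def innerBodyA (w : Int) (h_ : Int) (y : Int) (cells : List Int) (x : Int) : List Int :=
  let cells := if x < w - 1 then
      updA (updA cells (y*w+x) (~~~(2:Int))) (y*w+x+1) (~~~(8:Int))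
    else cells
  if y < h_ - 1 then
      updA (updA cells (y*w+x) (~~~(4:Int))) ((y+1)*w+x) (~~~(1:Int))
    else cells

def open_maze_py (w : Int) (h_ : Int) : List Int :=
  let cells := List.replicate (w * h_).toNat 15
  (PySem.List.pyRange 0 h_ 1).foldl
    (fun cells y => (PySem.List.pyRange 0 w 1).foldl (innerBodyA w h_ y) cells) cells

-- ===== PORT B =====

-- B's per-cell closed form: v = 0; v |= 1/2/4/8 on the matching grid border
def bCell (w : Int) (h_ : Int) (x : Int) (y : Int) : Int :=
  let v : Int := 0
  let v := if y = 0 then v.lor 1 else v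
  let v := if x = w - 1 then v.lor 2 else v
  let v := if y = h_ - 1 then v.lor 4 else v
  if x = 0 then v.lor 8 else v

def open_maze_py_alt (w : Int) (h_ : Int) : List Int :=
  (PySem.List.pyRange 0 h_ 1).foldl
    (fun cells y => (PySem.List.pyRange 0 w 1).foldl
      (fun cells x => cells ++ [bCell w h_ x y]) cells) []

-- ===== PRECONDITION & SPEC =====

-- When w < 0 and h_ < 0 the negative signs cancel in w*h_, so A returns a list of w*h_
-- cells all equal to 15 with no walls removed; B returns the empty list, the intended
-- result for a grid with non-positive dimensions.
def D_open_maze_py (w : Int) (h_ : Int) : Prop := w < 0 ∧ h_ < 0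
instance (w : Int) (h_ : Int) : Decidable (D_open_maze_py w h_) := by
  unfold D_open_maze_py; infer_instance

def Spec_open_maze_py (w : Int) (h_ : Int) (out : List Int) : Prop :=
  ¬ D_open_maze_py w h_ → out = open_maze_py_alt w h_
instance (w : Int) (h_ : Int) (out : List Int) : Decidable (Spec_open_maze_py w h_ out) := by
  unfold Spec_open_maze_py; infer_instance

def pvDiffWitness_open_maze_py : Int × Int := (-1, -1)
def pvDiffWitnessOut_open_maze_py : (List Int) × (List Int) := ([15], [])

-- ===== CLAIM (what is proved, stated in full; the proofs are below) =====
def Claim_unchanged_open_maze_py : Prop :=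
  ∀ (w : Int) (h_ : Int), Dom_open_maze_py w h_ → Spec_open_maze_py w h_ (open_maze_py w h_)
def Claim_changed_open_maze_py : Prop :=
  Dom_open_maze_py (pvDiffWitness_open_maze_py.1) (pvDiffWitness_open_maze_py.2) ∧
  D_open_maze_py (pvDiffWitness_open_maze_py.1) (pvDiffWitness_open_maze_py.2) ∧
  open_maze_py (pvDiffWitness_open_maze_py.1) (pvDiffWitness_open_maze_py.2) = pvDiffWitnessOut_open_maze_py.1 ∧
  open_maze_py_alt (pvDiffWitness_open_maze_py.1) (pvDiffWitness_open_maze_py.2) = pvDiffWitnessOut_open_maze_py.2 ∧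
  pvDiffWitnessOut_open_maze_py.1 ≠ pvDiffWitnessOut_open_maze_py.2
def Claim_exact_open_maze_py : Prop :=
  ∀ (w : Int) (h_ : Int), Dom_open_maze_py w h_ → D_open_maze_py w h_ →
    open_maze_py w h_ ≠ open_maze_py_alt w h_

-- ===== LEMMAS AND PROOFS =====

def fv (W H k j i : Nat) : Int :=
  let q := i / W
  let r := i % W
  if q < k then bCell (W:Int) (H:Int) (r:Int) (q:Int)
  else if q = k then
    if r < j then bCell (W:Int) (H:Int) (r:Int) (q:Int)
    else if r = j then 15 - (if 0 < k then 1 else 0) - (if 0 < j then 8 else 0)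
    else if 0 < k then 14 else 15
  else if q = k+1 ∧ r < j then 14 else 15

def InvA (W H : Nat) (s : List Int) (k j : Nat) : Prop :=
  s.length = W*H ∧ ∀ i, i < W*H → s.getD i 0 = fv W H k j i

lemma idx_unique (W q r k j : Nat) (hr : r < W) (hj : j < W) :
    q*W + r = k*W + j ↔ (q = k ∧ r = j) := by
  constructor
  · intro hEq
    rcases Nat.lt_trichotomy q k with h | h | h
    · exfalso
      have h1 : q*W + r < (q+1)*W := by nlinarith
      have h2 : (q+1)*W ≤ k*W := Nat.mul_le_mul_right _ h
      omega
    · subst h; omega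
    · exfalso
      have h1 : k*W + j < (k+1)*W := by nlinarith
      have h2 : (k+1)*W ≤ q*W := Nat.mul_le_mul_right _ h
      omega
  · rintro ⟨rfl, rfl⟩; rfl

lemma updA_length (s : List Int) (i : Int) (m : Int) : (updA s i m).length = s.length := by
  simp [updA]

lemma updA_getD_ne (s : List Int) (a : Nat) (m : Int) (t : Nat) (h : a ≠ t) :
    (updA s (a:Int) m).getD t 0 = s.getD t 0 := by
  simp [updA, h]

lemma updA_getD_eq (s : List Int) (a : Nat) (m : Int) (h : a < s.length) :
    (updA s (a:Int) m).getD a 0 = (s.getD a 0).land m := by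
  simp [updA, h]

lemma ldiff_eq_of_lt (a b : Nat) (ha : a < 16) : a.ldiff b = a &&& (b ^^^ 15) := by
  apply Nat.eq_of_testBit_eq
  intro i
  rw [Nat.testBit_ldiff, Nat.testBit_and, Nat.testBit_xor]
  rcases Nat.lt_or_ge i 4 with h | h
  · have h15 : Nat.testBit 15 i = true := by interval_cases i <;> decide
    simp [h15]
  · have ha' : Nat.testBit a i = false := by
      apply Nat.testBit_lt_two_pow
      calc a < 16 := ha
        _ = 2^4 := by norm_num
        _ ≤ 2^i := Nat.pow_le_pow_right (by norm_num) h
    simp [ha']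

lemma land_not_nat (a b : Nat) (ha : a < 16) :
    (Int.ofNat a).land (~~~(Int.ofNat b)) = Int.ofNat (a &&& (b ^^^ 15)) := by
  show Int.land (Int.ofNat a) (Int.negSucc b) = _
  rw [Int.land, ldiff_eq_of_lt a b ha]; rfl

lemma L15_2 : (15:Int).land (~~~(2:Int)) = 13 := land_not_nat 15 2 (by norm_num)
lemma L14_2 : (14:Int).land (~~~(2:Int)) = 12 := land_not_nat 14 2 (by norm_num)
lemma L7_2  : (7:Int).land (~~~(2:Int)) = 5  := land_not_nat 7 2 (by norm_num)
lemma L6_2  : (6:Int).land (~~~(2:Int)) = 4  := land_not_nat 6 2 (by norm_num)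
lemma L15_4 : (15:Int).land (~~~(4:Int)) = 11 := land_not_nat 15 4 (by norm_num)
lemma L14_4 : (14:Int).land (~~~(4:Int)) = 10 := land_not_nat 14 4 (by norm_num)
lemma L13_4 : (13:Int).land (~~~(4:Int)) = 9  := land_not_nat 13 4 (by norm_num)
lemma L12_4 : (12:Int).land (~~~(4:Int)) = 8  := land_not_nat 12 4 (by norm_num)
lemma L7_4  : (7:Int).land (~~~(4:Int)) = 3  := land_not_nat 7 4 (by norm_num)
lemma L6_4  : (6:Int).land (~~~(4:Int)) = 2  := land_not_nat 6 4 (by norm_num)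
lemma L5_4  : (5:Int).land (~~~(4:Int)) = 1  := land_not_nat 5 4 (by norm_num)
lemma L4_4  : (4:Int).land (~~~(4:Int)) = 0  := land_not_nat 4 4 (by norm_num)
lemma L15_8 : (15:Int).land (~~~(8:Int)) = 7  := land_not_nat 15 8 (by norm_num)
lemma L14_8 : (14:Int).land (~~~(8:Int)) = 6  := land_not_nat 14 8 (by norm_num)
lemma L15_1 : (15:Int).land (~~~(1:Int)) = 14 := land_not_nat 15 1 (by norm_num)

lemma bCell_eval (w h_ x y : Int) :
    bCell w h_ x y = (if y = 0 then (1:Int) else 0) + (if x = w-1 then 2 else 0)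
      + (if y = h_-1 then 4 else 0) + (if x = 0 then 8 else 0) := by
  unfold bCell
  split_ifs <;> decide

-- value of cell (k,j) after its own iteration of A's inner loop
lemma valA (W H k j : Nat) (hk : k < H) (hj : j < W) :
    (if k+1 < H then
       (if j+1 < W then ((15 - (if 0 < k then 1 else 0) - (if 0 < j then (8:Int) else 0)).land (~~~(2:Int)))
        else (15 - (if 0 < k then 1 else 0) - (if 0 < j then 8 else 0))).land (~~~(4:Int))
     else
       (if j+1 < W then ((15 - (if 0 < k then 1 else 0) - (if 0 < j then (8:Int) else 0)).land (~~~(2:Int)))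
        else (15 - (if 0 < k then 1 else 0) - (if 0 < j then 8 else 0))))
    = bCell (W:Int) (H:Int) (j:Int) (k:Int) := by
  rw [bCell_eval]
  have e1 : ((j:Int) = (W:Int)-1) ↔ ¬(j+1 < W) := by omega
  have e2 : ((k:Int) = (H:Int)-1) ↔ ¬(k+1 < H) := by omega
  have e3 : ((j:Int) = 0) ↔ j = 0 := by omega
  have e4 : ((k:Int) = 0) ↔ k = 0 := by omega
  simp only [e1, e2, e3, e4]
  by_cases k0 : k = 0 <;> by_cases j0 : j = 0 <;>
    simp only [k0, j0] <;> norm_num <;>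
    split_ifs <;>
    simp_all [L15_2, L14_2, L7_2, L6_2, L15_4, L14_4, L13_4, L12_4, L7_4, L6_4, L5_4, L4_4] <;>
    omega

lemma inner_step (W H k j : Nat) (s : List Int)
    (hW : 1 ≤ W) (hk : k < H) (hj : j < W) (hInv : InvA W H s k j) :
    InvA W H (innerBodyA (W:Int) (H:Int) (k:Int) s (j:Int)) k (j+1) := by
  obtain ⟨hlen, hpt⟩ := hInv
  have e1 : (k:Int)*(W:Int)+(j:Int)+1 = ((k*W+j+1 : Nat) : Int) := by push_cast; ring
  have e0 : (k:Int)*(W:Int)+(j:Int) = ((k*W+j : Nat) : Int) := by push_cast; ring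
  have e2 : ((k:Int)+1)*(W:Int)+(j:Int) = (((k+1)*W+j : Nat) : Int) := by push_cast; ring
  have emul : (k+1)*W = k*W + W := by ring
  have ha0 : k*W+j < W*H := by nlinarith
  unfold innerBodyA
  rw [e1, e0, e2]
  constructor
  · split_ifs <;> simp [updA_length, hlen]
  · intro i hi
    have hr : i % W < W := Nat.mod_lt _ (by omega)
    have hq : i / W < H := by
      rw [Nat.div_lt_iff_lt_mul (by omega : 0 < W), Nat.mul_comm]; exact hi
    have hd : (i / W) * W + i % W = i := by rw [Nat.mul_comm]; exact Nat.div_add_mod i W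
    have hu0 := idx_unique W (i/W) (i%W) k j hr hj
    rw [hd] at hu0
    have hu2 := idx_unique W (i/W) (i%W) (k+1) j hr hj
    rw [hd] at hu2
    by_cases cA : i / W = k ∧ i % W = j
    · -- the cell (k, j) itself
      obtain ⟨cq, cr⟩ := cA
      have hieq : k*W+j = i := by have := hu0.mpr ⟨cq, cr⟩; omega
      have hold : s.getD i 0 = 15 - (if 0 < k then 1 else 0) - (if 0 < j then (8:Int) else 0) := by
        rw [hpt i hi]; simp only [fv, cq, cr]; simp
      have hnew : fv W H k (j+1) i = bCell (W:Int) (H:Int) (j:Int) (k:Int) := by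
        simp only [fv, cq, cr]; simp
      have hv := valA W H k j hk hj
      rw [hieq] at ha0
      rw [hieq]
      split_ifs with h1 h2 h2
      · rw [updA_getD_ne _ _ _ _ (by omega), updA_getD_eq _ _ _ (by simp [updA_length, hlen]; omega),
            updA_getD_ne _ _ _ _ (by omega), updA_getD_eq _ _ _ (by simp [updA_length, hlen]; omega), hold, hnew]
        rw [if_pos (by omega : k+1 < H), if_pos (by omega : j+1 < W)] at hv
        exact hv
      · rw [updA_getD_ne _ _ _ _ (by omega), updA_getD_eq _ _ _ (by simp [updA_length, hlen]; omega), hold, hnew]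
        rw [if_neg (by omega : ¬(k+1 < H)), if_pos (by omega : j+1 < W)] at hv
        exact hv
      · rw [updA_getD_ne _ _ _ _ (by omega), updA_getD_eq _ _ _ (by simp [updA_length, hlen]; omega), hold, hnew]
        rw [if_pos (by omega : k+1 < H), if_neg (by omega : ¬(j+1 < W))] at hv
        exact hv
      · rw [hold, hnew]
        rw [if_neg (by omega : ¬(k+1 < H)), if_neg (by omega : ¬(j+1 < W))] at hv
        exact hv
    · by_cases cB : i / W = k ∧ i % W = j+1
      · -- the cell (k, j+1): its west wall gets cleared (only reachable when j+1 < W)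
        obtain ⟨cq, cr⟩ := cB
        have hj1 : j+1 < W := by omega
        have hu1 := idx_unique W (i/W) (i%W) k (j+1) hr hj1
        rw [hd] at hu1
        have hieq : k*W+j+1 = i := by have := hu1.mpr ⟨cq, cr⟩; omega
        have hold : s.getD i 0 = (if 0 < k then (14:Int) else 15) := by
          rw [hpt i hi]; simp only [fv, cq, cr]; simp
        have hnew : fv W H k (j+1) i
            = 15 - (if 0 < k then 1 else 0) - (8:Int) := by
          simp only [fv, cq, cr]; simp
        rw [hieq]
        split_ifs with h1 h2 h2
        · rw [updA_getD_ne _ _ _ _ (by omega), updA_getD_ne _ _ _ _ (by omega),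
              updA_getD_eq _ _ _ (by simp [updA_length, hlen]; omega),
              updA_getD_ne _ _ _ _ (by omega), hold, hnew]
          by_cases hk0 : 0 < k <;> simp [hk0, L15_8, L14_8]
        · rw [updA_getD_eq _ _ _ (by simp [updA_length, hlen]; omega),
              updA_getD_ne _ _ _ _ (by omega), hold, hnew]
          by_cases hk0 : 0 < k <;> simp [hk0, L15_8, L14_8]
        · omega
        · omega
      · by_cases cC : i / W = k+1 ∧ i % W = j
        · -- the cell (k+1, j): its north wall gets cleared (only reachable when k+1 < H)
          obtain ⟨cq, cr⟩ := cC
          have hk1 : k+1 < H := by omega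
          have hieq : (k+1)*W+j = i := by have := hu2.mpr ⟨cq, cr⟩; omega
          have hold : s.getD i 0 = (15:Int) := by
            rw [hpt i hi]; simp only [fv, cq, cr]; simp
          have hnew : fv W H k (j+1) i = (14:Int) := by
            simp only [fv, cq, cr]; simp
          rw [hieq]
          split_ifs with h1 h2 h2
          · rw [updA_getD_eq _ _ _ (by simp [updA_length, hlen]; omega),
                updA_getD_ne _ _ _ _ (by omega), updA_getD_ne _ _ _ _ (by omega),
                updA_getD_ne _ _ _ _ (by omega), hold, hnew, L15_1]
          · omega
          · rw [updA_getD_eq _ _ _ (by simp [updA_length, hlen]; omega),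
                updA_getD_ne _ _ _ _ (by omega), hold, hnew, L15_1]
          · omega
        · -- untouched cell
          have hne0 : k*W+j ≠ i := fun h => cA (hu0.mp h.symm)
          have hne2 : (k+1)*W+j ≠ i := fun h => cC (hu2.mp h.symm)
          have hsame : fv W H k j i = fv W H k (j+1) i := by
            simp only [fv]
            split_ifs <;> first | rfl | omega
          split_ifs with h1 h2 h2
          · have hj1 : j+1 < W := by omega
            have hu1 := idx_unique W (i/W) (i%W) k (j+1) hr hj1
            rw [hd] at hu1
            have hne1 : k*W+j+1 ≠ i := fun h => cB (hu1.mp (by omega))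
            rw [updA_getD_ne _ _ _ _ hne2, updA_getD_ne _ _ _ _ hne0,
                updA_getD_ne _ _ _ _ hne1, updA_getD_ne _ _ _ _ hne0, hpt i hi]
            exact hsame
          · have hj1 : j+1 < W := by omega
            have hu1 := idx_unique W (i/W) (i%W) k (j+1) hr hj1
            rw [hd] at hu1
            have hne1 : k*W+j+1 ≠ i := fun h => cB (hu1.mp (by omega))
            rw [updA_getD_ne _ _ _ _ hne1, updA_getD_ne _ _ _ _ hne0, hpt i hi]
            exact hsame
          · rw [updA_getD_ne _ _ _ _ hne2, updA_getD_ne _ _ _ _ hne0, hpt i hi]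
            exact hsame
          · rw [hpt i hi]
            exact hsame

lemma fv_roll (W H k i : Nat) (hW : 1 ≤ W) (hi : i < W*H) :
    fv W H k W i = fv W H (k+1) 0 i := by
  have hr : i % W < W := Nat.mod_lt _ (by omega)
  have hq : i / W < H := by
    rw [Nat.div_lt_iff_lt_mul (by omega : 0 < W), Nat.mul_comm]; exact hi
  simp only [fv]
  split_ifs <;> first | rfl | omega | norm_num

lemma inner_fold (W H k : Nat) (hW : 1 ≤ W) (hk : k < H) :
    ∀ (m j : Nat) (s : List Int), j + m = W → InvA W H s k j →
      InvA W H ((PySem.List.pyRange (j:Int) (W:Int) 1).foldl (innerBodyA (W:Int) (H:Int) (k:Int)) s) k W := by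
  intro m
  induction m with
  | zero =>
    intro j s hjm hInv
    rw [PySem.List.pyRange_one_eq_nil (by omega : (W:Int) ≤ (j:Int))]
    obtain rfl : j = W := by omega
    simpa using hInv
  | succ m ih =>
    intro j s hjm hInv
    have hj : j < W := by omega
    rw [PySem.List.pyRange_one_cons (by exact_mod_cast hj : (j:Int) < (W:Int))]
    simp only [List.foldl_cons]
    have hstep := inner_step W H k j s hW hk hj hInv
    have hcast : ((j:Int) + 1) = ((j+1 : Nat) : Int) := by push_cast; ring
    rw [hcast]
    exact ih (j+1) _ (by omega) hstep

lemma outer_fold (W H : Nat) (hW : 1 ≤ W) :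
    ∀ (m k : Nat) (s : List Int), k + m = H → InvA W H s k 0 →
      InvA W H ((PySem.List.pyRange (k:Int) (H:Int) 1).foldl
        (fun s y => (PySem.List.pyRange 0 (W:Int) 1).foldl (innerBodyA (W:Int) (H:Int) y) s) s) H 0 := by
  intro m
  induction m with
  | zero =>
    intro k s hkm hInv
    rw [PySem.List.pyRange_one_eq_nil (by omega : (H:Int) ≤ (k:Int))]
    obtain rfl : k = H := by omega
    simpa using hInv
  | succ m ih =>
    intro k s hkm hInv
    have hk : k < H := by omega
    rw [PySem.List.pyRange_one_cons (by exact_mod_cast hk : (k:Int) < (H:Int))]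
    simp only [List.foldl_cons]
    have hrow := inner_fold W H k hW hk W 0 s (by omega) hInv
    rw [show ((0:Nat):Int) = 0 by norm_num] at hrow
    have hroll : InvA W H ((PySem.List.pyRange 0 (W:Int) 1).foldl (innerBodyA (W:Int) (H:Int) (k:Int)) s) (k+1) 0 := by
      obtain ⟨hlen', hpt'⟩ := hrow
      exact ⟨hlen', fun i hi => (hpt' i hi).trans (fv_roll W H k i hW hi)⟩
    have hcast : ((k:Int) + 1) = ((k+1 : Nat) : Int) := by push_cast; ring
    rw [hcast]
    exact ih (k+1) _ (by omega) hroll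

lemma init_inv (W H : Nat) : InvA W H (List.replicate (W*H) 15) 0 0 := by
  constructor
  · simp
  · intro i hi
    rw [List.getD_eq_getElem?_getD, List.getElem?_replicate]
    simp only [fv, hi]
    by_cases hq0 : i / W = 0 <;> by_cases hr0 : i % W = 0 <;>
      simp [hq0, hr0]

lemma alt_rows (W : Nat) (h_ : Int) : ∀ (n : Nat) (acc : List Int),
    (PySem.List.pyRange 0 (n:Int) 1).foldl
      (fun cells y => (PySem.List.pyRange 0 (W:Int) 1).foldl
        (fun cells x => cells ++ [bCell (W:Int) h_ x y]) cells) acc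
    = acc ++ (List.range n).flatMap
        (fun (y : Nat) => (PySem.List.pyRange 0 (W:Int) 1).map (fun x => bCell (W:Int) h_ x ((y:Nat):Int))) := by
  intro n
  induction n with
  | zero =>
    intro acc
    rw [PySem.List.pyRange_one_eq_nil (a := 0) (b := ((0:Nat):Int)) (by norm_num)]
    simp
  | succ n ih =>
    intro acc
    have hsp : ((n+1 : Nat) : Int) = (n:Int) + 1 := by push_cast; ring
    rw [hsp, PySem.List.pyRange_one_succ_right (by positivity), List.foldl_append]
    rw [ih acc]
    simp only [List.foldl_cons, List.foldl_nil]
    rw [PySem.List.foldl_append_singleton_eq_map]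
    rw [List.range_succ, List.flatMap_append, List.append_assoc]
    simp

lemma alt_len (W H : Nat) (h_ : Int) :
    ((List.range H).flatMap
      (fun (y : Nat) => (PySem.List.pyRange 0 (W:Int) 1).map (fun x => bCell (W:Int) h_ x ((y:Nat):Int)))).length
    = W*H := by
  rw [List.length_flatMap]
  have h : ∀ y ∈ List.range H, ((PySem.List.pyRange 0 (W:Int) 1).map
      (fun x => bCell (W:Int) h_ x ((y:Nat):Int))).length = W := by
    intro y _
    simp [PySem.List.length_pyRange_one]
  rw [List.map_congr_left h, List.map_const']
  simp [Nat.mul_comm]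

lemma alt_get (W : Nat) (h_ : Int) (hW : 1 ≤ W) : ∀ (H i : Nat), i < W*H →
    ((List.range H).flatMap
      (fun (y : Nat) => (PySem.List.pyRange 0 (W:Int) 1).map (fun x => bCell (W:Int) h_ x ((y:Nat):Int)))).getD i 0
    = bCell (W:Int) h_ ((i % W : Nat) : Int) ((i / W : Nat) : Int) := by
  intro H
  induction H with
  | zero => intro i hi; omega
  | succ H ih =>
    intro i hi
    rw [List.range_succ, List.flatMap_append]
    by_cases hlt : i < W*H
    · rw [List.getD_eq_getElem?_getD, List.getElem?_append_left (by rw [alt_len]; exact hlt)]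
      rw [← List.getD_eq_getElem?_getD]
      exact ih i hlt
    · have hr : i - W*H < W := by
        have h2 : W*(H+1) = W*H + W := by ring
        omega
      have hidx : i = W*H + (i - W*H) := by omega
      have hdiv : i / W = H := by
        rw [hidx, Nat.mul_add_div (by omega : 0 < W), Nat.div_eq_of_lt hr]
        omega
      have hmod : i % W = i - W*H := by
        rw [hidx, Nat.mul_add_mod, Nat.mod_eq_of_lt hr]
        omega
      rw [List.getD_eq_getElem?_getD, List.getElem?_append_right (by rw [alt_len]; omega)]
      rw [alt_len]
      simp only [List.flatMap_cons, List.flatMap_nil, List.append_nil]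
      rw [List.getElem?_map, PySem.List.getElem?_pyRange_one]
      rw [if_pos (by simp; omega)]
      simp only [Option.map_some, Option.getD_some]
      rw [hdiv, hmod]
      simp

lemma ext_getD (l1 l2 : List Int) (hlen : l1.length = l2.length)
    (h : ∀ i, i < l1.length → l1.getD i 0 = l2.getD i 0) : l1 = l2 := by
  apply List.ext_getElem hlen
  intro i h1 h2
  have hh := h i h1
  rwa [List.getD_eq_getElem?_getD, List.getD_eq_getElem?_getD,
      List.getElem?_eq_getElem h1, List.getElem?_eq_getElem h2] at hh

lemma main_pos (W H : Nat) (hW : 1 ≤ W) (_hH : 1 ≤ H) :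
    open_maze_py (W:Int) (H:Int) = open_maze_py_alt (W:Int) (H:Int) := by
  unfold open_maze_py
  have hN : ((W:Int) * (H:Int)).toNat = W*H := by
    rw [← Nat.cast_mul, Int.toNat_natCast]
  rw [hN]
  have hfin := outer_fold W H hW H 0 (List.replicate (W*H) 15) (by omega) (init_inv W H)
  rw [show ((0:Nat):Int) = 0 by norm_num] at hfin
  obtain ⟨hlen, hpt⟩ := hfin
  have halt : open_maze_py_alt (W:Int) (H:Int)
      = (List.range H).flatMap
        (fun (y : Nat) => (PySem.List.pyRange 0 (W:Int) 1).map (fun x => bCell (W:Int) (H:Int) x ((y:Nat):Int))) := by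
    unfold open_maze_py_alt
    rw [alt_rows W (H:Int) H []]
    simp
  rw [halt]
  apply ext_getD
  · rw [hlen, alt_len]
  · intro i hi
    rw [hlen] at hi
    rw [hpt i hi, alt_get W (H:Int) hW H i hi]
    have hr : i % W < W := Nat.mod_lt _ (by omega)
    have hq : i / W < H := by
      rw [Nat.div_lt_iff_lt_mul (by omega : 0 < W), Nat.mul_comm]; exact hi
    simp only [fv]
    rw [if_pos hq]

lemma alt_nil (w h_ : Int) (h : w ≤ 0 ∨ h_ ≤ 0) : open_maze_py_alt w h_ = [] := by
  unfold open_maze_py_alt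
  rcases h with h | h
  · rw [PySem.List.foldl_congr_mem (PySem.List.pyRange 0 h_ 1)
      (fun cells y => (PySem.List.pyRange 0 w 1).foldl (fun cells x => cells ++ [bCell w h_ x y]) cells)
      (fun acc _ => acc) []
      (by intro acc x _; rw [PySem.List.pyRange_one_eq_nil (by omega : w ≤ 0)]; rfl)]
    rw [PySem.List.foldl_ignore]
  · rw [PySem.List.pyRange_one_eq_nil (by omega : h_ ≤ 0)]
    rfl

lemma a_nil (w h_ : Int) (hD : ¬ (w < 0 ∧ h_ < 0)) (h : w ≤ 0 ∨ h_ ≤ 0) :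
    open_maze_py w h_ = [] := by
  have hmul : w * h_ ≤ 0 := by
    rcases h with h | h
    · rcases lt_or_ge h_ 0 with h2 | h2
      · have hw0 : w = 0 := by omega
        simp [hw0]
      · nlinarith
    · rcases lt_or_ge w 0 with h2 | h2
      · have hh0 : h_ = 0 := by omega
        simp [hh0]
      · nlinarith
  have hz : (w * h_).toNat = 0 := by omega
  show (PySem.List.pyRange 0 h_ 1).foldl
    (fun cells y => (PySem.List.pyRange 0 w 1).foldl (innerBodyA w h_ y) cells)
    (List.replicate (w * h_).toNat 15) = []
  rw [hz]
  rcases le_or_gt h_ 0 with h2 | h2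
  · rw [PySem.List.pyRange_one_eq_nil (by omega : h_ ≤ 0)]
    rfl
  · have hw : w ≤ 0 := by
      rcases h with h | h
      · exact h
      · omega
    rw [PySem.List.foldl_congr_mem (PySem.List.pyRange 0 h_ 1)
      (fun cells y => (PySem.List.pyRange 0 w 1).foldl (innerBodyA w h_ y) cells)
      (fun acc _ => acc) (List.replicate 0 15)
      (by intro acc x _; rw [PySem.List.pyRange_one_eq_nil (by omega : w ≤ 0)]; rfl)]
    rw [PySem.List.foldl_ignore]
    rfl

-- ===== VERDICT (by name: the statement is the Claim_ definition above) =====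
theorem open_maze_py_spec : Claim_unchanged_open_maze_py := by
  intro w h_ _ hD
  have hD' : ¬ (w < 0 ∧ h_ < 0) := hD
  by_cases hw : 1 ≤ w
  · by_cases hh : 1 ≤ h_
    · obtain ⟨W, rfl⟩ : ∃ W : Nat, w = (W:Int) := ⟨w.toNat, (Int.toNat_of_nonneg (by omega)).symm⟩
      obtain ⟨H, rfl⟩ : ∃ H : Nat, h_ = (H:Int) := ⟨h_.toNat, (Int.toNat_of_nonneg (by omega)).symm⟩
      exact main_pos W H (by exact_mod_cast hw) (by exact_mod_cast hh)
    · rw [a_nil w h_ hD' (Or.inr (by omega)), alt_nil w h_ (Or.inr (by omega))]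
  · rw [a_nil w h_ hD' (Or.inl (by omega)), alt_nil w h_ (Or.inl (by omega))]

theorem open_maze_py_changed : Claim_changed_open_maze_py := by
  unfold Claim_changed_open_maze_py; decide

theorem open_maze_py_tight : Claim_exact_open_maze_py := by
  intro w h_ _ hD
  obtain ⟨hw, hh⟩ := hD
  have hA : open_maze_py w h_ = List.replicate (w*h_).toNat 15 := by
    show (PySem.List.pyRange 0 h_ 1).foldl _ (List.replicate (w * h_).toNat 15) = _
    rw [PySem.List.pyRange_one_eq_nil (by omega : h_ ≤ 0)]
    rfl
  have hB : open_maze_py_alt w h_ = [] := alt_nil w h_ (Or.inl (by omega))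
  rw [hA, hB]
  intro hEq
  have hpos : 0 < w * h_ := mul_pos_of_neg_of_neg hw hh
  have hl := congrArg List.length hEq
  simp at hl
  omega
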